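-- pv_equiv track=rewrite | github.com/adrienKoumgangT/TME-PROGRES-SORBONNE-UNIVERSITE | tme3/tme3.py | inverse_nombre
-- ===== SOURCE A (Python) =====
-- BASE_HEX = {"0": "0", "1": "1", "2": "2", "3": "3", "4": "4", "5": "5",
--             "6": "6", "7": "7", "8": "8", "9": "9",
--             "a": "10", "b": "11", "c": "12", "d": "13", "e": "14", "f": "15",
--             "10": "a", "11": "b", "12": "c", "13": "d", "14": "e", "15": "f"}
--
-- def convert_base_ten_to_b(number: int, base: int = 2) -> str:
--     """
--     Méthode qui me permet de convertir un nombre de base 10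
--     vers une base b (par défaut b = 2)
--     """
--     if number <= 0 or base <= 1:
--         return ""
--     remains = []
--     dividende = number
--     while dividende != 0:
--         rest = dividende % base
--         remains.append(BASE_HEX[str(rest)])
--         dividende //= base
--     remains.reverse()
--     return "".join(remains)
--
-- def convert_base_b_to_ten(number: str, base: int = 2) -> int:
--     """
--     Méthode qui me permet de convertir un nombre
--     d'une base b (par défaut b = 2) vers la base 10.
--     """
--     if not number:
--         raise Exception("Invalid number")
--     if base <= 1:
--         raise Exception("The base must be greater than 1")
--     lists = []
--     for symbol in number:
--         lists.append(symbol)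
--     lists.reverse()
--     valeur = 0
--     for i in range(0, len(lists)):
--         valeur += int(BASE_HEX[lists[i]]) * (base ** i)
--     return valeur
--
-- def inverse_nombre(number):
--     if number == 255:
--         return 0
--     if number == 0:
--         return 255
--     nb = convert_base_ten_to_b(number=number, base=2)
--     ni = ""
--     for bit in nb:
--         if bit == "0":
--             ni += "1"
--         else:
--             ni += "0"
--     return convert_base_b_to_ten(number=ni, base=2)
-- ===== SOURCE B (Python) =====
-- def inverse_nombre(number):
--     if number < 0:
--         raise Exception("Invalid number")
--     if number == 0:
--         return 255
--     return (1 << number.bit_length()) - 1 - number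
-- ===== Notes on version B (the rewrite author's own statement) =====
-- stated objective: simpler
-- what changed: Replaces the decimal-to-binary string conversion, the per-bit string flipping loop and the binary-to-decimal conversion by a single closed-form shift expression built from number.bit_length().
import Mathlib
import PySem

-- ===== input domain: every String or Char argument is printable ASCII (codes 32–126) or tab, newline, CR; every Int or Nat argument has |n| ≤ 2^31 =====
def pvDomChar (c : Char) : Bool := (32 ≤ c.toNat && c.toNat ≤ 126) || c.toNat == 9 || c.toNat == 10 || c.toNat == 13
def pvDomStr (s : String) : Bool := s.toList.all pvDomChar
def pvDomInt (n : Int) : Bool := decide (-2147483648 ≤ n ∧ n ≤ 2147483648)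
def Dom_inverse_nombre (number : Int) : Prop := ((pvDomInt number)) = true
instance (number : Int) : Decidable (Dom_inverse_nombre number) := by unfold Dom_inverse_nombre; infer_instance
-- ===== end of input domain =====

-- B replaces A's base-conversion round trip (decimal -> binary string, per-bit flip loop,
-- binary string -> decimal) by the closed form (1 <<< bit_length(number)) - 1 - number.

-- ===== PORT A =====
def BASE_HEX : PySem.Dict String String :=
  PySem.Dict.ofList [("0", "0"), ("1", "1"), ("2", "2"), ("3", "3"), ("4", "4"), ("5", "5"),
                     ("6", "6"), ("7", "7"), ("8", "8"), ("9", "9"),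
                     ("a", "10"), ("b", "11"), ("c", "12"), ("d", "13"), ("e", "14"), ("f", "15"),
                     ("10", "a"), ("11", "b"), ("12", "c"), ("13", "d"), ("14", "e"), ("15", "f")]

-- the 'while dividende != 0' loop of convert_base_ten_to_b; fuel only makes it total
-- (Dom bounds |number| ≤ 2^31, so 64 iterations always suffice on the guarded path number > 0)
def ctbLoop : Nat → Int → Int → List String → List String
  | 0, _, _, remains => remains
  | fuel + 1, dividende, base, remains =>
    if dividende = 0 then remains
    else
      let rest := PySem.Int.mod dividende base
      ctbLoop fuel (PySem.Int.floordiv dividende base) base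
        (remains ++ [(BASE_HEX.get? (PySem.Int.toStr rest)).getD ""])

def convert_base_ten_to_b (number : Int) (base : Int) : String :=
  if number ≤ 0 ∨ base ≤ 1 then ""
  else PySem.Str.join "" (ctbLoop 64 number base []).reverse

-- the raise branches return 0; inside Pre_ they are never reached
def convert_base_b_to_ten (number : String) (base : Int) : Int :=
  if number.toList = [] then 0
  else if base ≤ 1 then 0
  else
    let lists := number.toList.reverse
    (List.range lists.length).foldl
      (fun valeur i =>
        valeur +
          ((PySem.Int.ofStr? ((BASE_HEX.get? (String.ofList [lists.getD i ' '])).getD "")).getD 0)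
            * base ^ i) 0

def inverse_nombre (number : Int) : Int :=
  if number = 255 then 0
  else if number = 0 then 255
  else
    let nb := convert_base_ten_to_b number 2
    let ni := nb.toList.foldl (fun acc bit => acc ++ [if bit = '0' then '1' else '0']) ([] : List Char)
    convert_base_b_to_ten (String.ofList ni) 2

-- ===== PORT B =====
-- Source B raises Exception("Invalid number") on number < 0 (outside Pre_); the port returns 0 there
def inverse_nombre_alt (number : Int) : Int :=
  if number < 0 then 0
  else if number = 0 then 255
  else (1 <<< PySem.Int.bitLength number : Int) - 1 - number

-- ===== PRECONDITION & SPEC =====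
-- Pre_ excludes negative numbers: there convert_base_ten_to_b returns "" and
-- convert_base_b_to_ten raises Exception("Invalid number"), so A returns no value (B raises too).
def Pre_inverse_nombre (number : Int) : Prop := 0 ≤ number
instance (number : Int) : Decidable (Pre_inverse_nombre number) := by unfold Pre_inverse_nombre; infer_instance
def pvWitness_inverse_nombre : Int := 6

def Spec_inverse_nombre (number : Int) (out : Int) : Prop := out = inverse_nombre_alt number
instance (number : Int) (out : Int) : Decidable (Spec_inverse_nombre number out) := by unfold Spec_inverse_nombre; infer_instance

-- ===== CLAIM (what is proved, stated in full; the proofs are below) =====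
def Claim_equal_inverse_nombre : Prop := ∀ (number : Int), Dom_inverse_nombre number → Pre_inverse_nombre number → Spec_inverse_nombre number (inverse_nombre number)

-- ===== LEMMAS AND PROOFS =====

-- binary digits of m, least significant first, as characters
def cdigits (m : Nat) : List Char :=
  if m = 0 then [] else (if m % 2 = 0 then '0' else '1') :: cdigits (m / 2)
decreasing_by exact Nat.div_lt_self (Nat.pos_of_ne_zero (by assumption)) (by omega)

def flipC (c : Char) : Char := if c = '0' then '1' else '0'

def bitVal (c : Char) : Int :=
  (PySem.Int.ofStr? ((BASE_HEX.get? (String.ofList [c])).getD "")).getD 0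

def polyval : List Char → Int
  | [] => 0
  | c :: cs => bitVal c + 2 * polyval cs

lemma cdigits_zero : cdigits 0 = [] := by rw [cdigits]; simp

lemma cdigits_pos {m : Nat} (h : 0 < m) :
    cdigits m = (if m % 2 = 0 then '0' else '1') :: cdigits (m / 2) := by
  rw [cdigits]; simp [Nat.pos_iff_ne_zero.mp h]

lemma cdigits_ne_nil {m : Nat} (h : 0 < m) : cdigits m ≠ [] := by
  rw [cdigits_pos h]; simp

lemma ctbLoop_spec : ∀ (fuel m : Nat) (remains : List String), m < 2 ^ fuel →
    ctbLoop fuel (m : Int) 2 remains = remains ++ (cdigits m).map (fun c => String.ofList [c]) := by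
  intro fuel
  induction fuel with
  | zero => intro m remains h; interval_cases m; simp [ctbLoop, cdigits]
  | succ fuel ih =>
    intro m remains h
    by_cases hm : m = 0
    · subst hm; simp [ctbLoop, cdigits]
    · have hmpos : 0 < m := Nat.pos_of_ne_zero hm
      rw [ctbLoop]
      rw [if_neg (by exact_mod_cast hm)]
      have hmod : PySem.Int.mod (m : Int) 2 = ((m % 2 : Nat) : Int) := PySem.Int.mod_natCast m 2
      have hdiv : PySem.Int.floordiv (m : Int) 2 = ((m / 2 : Nat) : Int) := PySem.Int.floordiv_natCast m 2
      rw [hmod, hdiv, ih (m / 2) _ (by omega)]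
      rw [cdigits_pos hmpos]
      have hd : (BASE_HEX.get? (PySem.Int.toStr ((m % 2 : Nat) : Int))).getD ""
          = String.ofList [if m % 2 = 0 then '0' else '1'] := by
        rcases Nat.mod_two_eq_zero_or_one m with h2 | h2 <;> rw [h2] <;> decide
      rw [hd]
      simp

lemma length_cdigits : ∀ m : Nat, (cdigits m).length = PySem.Int.bitLength (m : Int) := by
  intro m
  induction m using Nat.strong_induction_on with
  | _ m ih =>
    by_cases hm : m = 0
    · subst hm; simp [cdigits_zero, PySem.Int.bitLength_zero]
    · have hmpos : 0 < m := Nat.pos_of_ne_zero hm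
      rw [cdigits_pos hmpos, PySem.Int.bitLength_natCast hmpos]
      simp [ih (m / 2) (Nat.div_lt_self hmpos (by omega))]

lemma sum_eq_polyval : ∀ (l : List Char),
    ((List.range l.length).map (fun i => bitVal (l.getD i ' ') * (2 : Int) ^ i)).sum = polyval l := by
  intro l
  induction l with
  | nil => simp [polyval]
  | cons c cs ih =>
    rw [List.length_cons, List.range_succ_eq_map, List.map_cons, List.sum_cons, List.map_map]
    rw [polyval, ← ih]
    have hmap : (List.range cs.length).map
          ((fun i => bitVal ((c :: cs).getD i ' ') * (2 : Int) ^ i) ∘ Nat.succ)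
        = (List.range cs.length).map (fun i => 2 * (bitVal (cs.getD i ' ') * (2 : Int) ^ i)) := by
      refine List.map_congr_left ?_
      intro i _
      simp [Function.comp, pow_succ]
      ring
    rw [hmap, List.sum_map_mul_left]
    simp [pow_zero]

lemma foldl_range_polyval (l : List Char) :
    (List.range l.length).foldl
      (fun valeur i => valeur + bitVal (l.getD i ' ') * (2 : Int) ^ i) 0 = polyval l := by
  rw [PySem.List.foldl_add, sum_eq_polyval]
  ring

lemma bitVal_flip (m : Nat) :
    bitVal (flipC (if m % 2 = 0 then '0' else '1')) = 1 - ((m % 2 : Nat) : Int) := by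
  rcases Nat.mod_two_eq_zero_or_one m with h | h <;> rw [h] <;> decide

lemma polyval_flip : ∀ m : Nat, 0 < m →
    polyval ((cdigits m).map flipC) = 2 ^ (cdigits m).length - 1 - (m : Int) := by
  intro m
  induction m using Nat.strong_induction_on with
  | _ m ih =>
    intro h
    rw [cdigits_pos h]
    simp only [List.map_cons, polyval, List.length_cons, bitVal_flip]
    by_cases h2 : m / 2 = 0
    · have hm1 : m = 1 := by omega
      subst hm1
      have h12 : (1 : Nat) / 2 = 0 := by norm_num
      rw [h12, cdigits_zero]
      simp [polyval]
    · rw [ih (m / 2) (Nat.div_lt_self h (by omega)) (Nat.pos_of_ne_zero h2)]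
      have hm : (m : Int) = 2 * ((m / 2 : Nat) : Int) + ((m % 2 : Nat) : Int) := by
        push_cast
        omega
      rw [hm, pow_succ]
      ring

lemma one_shl (L : Nat) : (1 <<< L : Int) = 2 ^ L := by
  simp [Int.shiftLeft_eq]

lemma cbt_eval (l : List Char) (hl : l ≠ []) :
    convert_base_b_to_ten (String.ofList l) 2 = polyval l.reverse := by
  rw [convert_base_b_to_ten]
  rw [if_neg (by simpa using hl), if_neg (by norm_num)]
  simp only [String.toList_ofList]
  have h := foldl_range_polyval l.reverse
  simp only [bitVal] at h
  exact h

-- main computation for positive inputs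
lemma inverse_pos (m : Nat) (hpos : 0 < m) (hbound : m < 2 ^ 64) (h255 : (m : Int) ≠ 255) :
    inverse_nombre (m : Int) = 2 ^ PySem.Int.bitLength ((m : Nat) : Int) - 1 - (m : Int) := by
  have hne0 : ((m : Nat) : Int) ≠ 0 := by exact_mod_cast Nat.pos_iff_ne_zero.mp hpos
  rw [inverse_nombre, if_neg h255, if_neg hne0]
  have hctb : convert_base_ten_to_b (m : Int) 2
      = PySem.Str.join "" ((cdigits m).map (fun c => String.ofList [c])).reverse := by
    have hguard : ¬(((m : Nat) : Int) ≤ 0 ∨ (2 : Int) ≤ 1) := by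
      intro hcon
      rcases hcon with hc | hc
      · omega
      · norm_num at hc
    rw [convert_base_ten_to_b, if_neg hguard, ctbLoop_spec 64 m [] hbound]
    simp
  rw [hctb]
  have hnb : (PySem.Str.join "" ((cdigits m).map (fun c => String.ofList [c])).reverse).toList
      = (cdigits m).reverse := by
    rw [PySem.Str.toList_join]
    have : (((cdigits m).map (fun c => String.ofList [c])).reverse).map String.toList
        = ((cdigits m).reverse).map (fun c => [c]) := by
      rw [← List.map_reverse, List.map_map]
      simp [Function.comp]
    have he : ("" : String).toList = [] := by decide
    rw [this, he]
    exact PySem.Chars.join_nil_singletons _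
  simp only [hnb]
  have hni : ((cdigits m).reverse).foldl
        (fun acc bit => acc ++ [if bit = '0' then '1' else '0']) ([] : List Char)
      = ((cdigits m).reverse).map flipC := by
    rw [PySem.List.foldl_append_singleton_eq_map]
    simp [flipC]
  simp only [hni]
  have hne : ((cdigits m).reverse).map flipC ≠ [] := by
    intro hcon
    exact cdigits_ne_nil hpos (by simpa using hcon)
  rw [cbt_eval _ hne]
  have hrev : (((cdigits m).reverse).map flipC).reverse = (cdigits m).map flipC := by
    simp
  rw [hrev, polyval_flip m hpos, length_cdigits]

-- ===== VERDICT (by name: the statement is the Claim_ definition above) =====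
theorem inverse_nombre_spec : Claim_equal_inverse_nombre := by
  intro n hdom hpre
  unfold Spec_inverse_nombre
  by_cases h0 : n = 0
  · subst h0; decide
  · have hposI : 0 < n := by
      unfold Pre_inverse_nombre at hpre; omega
    obtain ⟨m, rfl⟩ : ∃ m : Nat, n = (m : Int) := ⟨n.toNat, (Int.toNat_of_nonneg hpre).symm⟩
    have hbound : m < 2 ^ 64 := by
      unfold Dom_inverse_nombre at hdom
      simp [pvDomInt] at hdom
      omega
    by_cases h255 : (m : Int) = 255
    · have hm : m = 255 := by exact_mod_cast h255
      subst hm; decide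
    · have hposN : 0 < m := by exact_mod_cast hposI
      rw [inverse_pos m hposN hbound h255]
      rw [inverse_nombre_alt,
        if_neg (by omega), if_neg (by exact_mod_cast Nat.pos_iff_ne_zero.mp hposN)]
      rw [one_shl]
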